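-- pv_equiv track=rewrite | github.com/jeffharrington/advent-of-code-2022 | day8/day8b.py | score_from_top
-- ===== SOURCE A (Python) =====
-- def score_from_top(matrix, row, col):
--     target_val = matrix[row][col]
--     col_vals = [matrix[i][col] for i in range(len(matrix))]
--     score = 0
--     top_vals = col_vals[:row]
--     top_vals.reverse()
--     for val in top_vals:
--         if val < target_val:
--             score += 1
--         elif val >= target_val:
--             score += 1
--             return score
--     return score
-- ===== SOURCE B (Python) =====
-- def score_from_top(matrix, row, col):
--     target_val = matrix[row][col]
--     col_vals = [matrix[i][col] for i in range(len(matrix))]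
--     top = col_vals[:row]
--     block = None
--     for i, val in enumerate(top):
--         if val >= target_val:
--             block = i
--     return len(top) if block is None else len(top) - block
-- ===== Notes on version B (the rewrite author's own statement) =====
-- stated objective: alternative
-- what changed: Replaces the reverse-then-count-with-early-return loop by a single forward scan over the rows above that remembers the index of the LAST blocking tree, the viewing distance then being len(top) - block by arithmetic (or len(top) if none blocks).
import Mathlib
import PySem

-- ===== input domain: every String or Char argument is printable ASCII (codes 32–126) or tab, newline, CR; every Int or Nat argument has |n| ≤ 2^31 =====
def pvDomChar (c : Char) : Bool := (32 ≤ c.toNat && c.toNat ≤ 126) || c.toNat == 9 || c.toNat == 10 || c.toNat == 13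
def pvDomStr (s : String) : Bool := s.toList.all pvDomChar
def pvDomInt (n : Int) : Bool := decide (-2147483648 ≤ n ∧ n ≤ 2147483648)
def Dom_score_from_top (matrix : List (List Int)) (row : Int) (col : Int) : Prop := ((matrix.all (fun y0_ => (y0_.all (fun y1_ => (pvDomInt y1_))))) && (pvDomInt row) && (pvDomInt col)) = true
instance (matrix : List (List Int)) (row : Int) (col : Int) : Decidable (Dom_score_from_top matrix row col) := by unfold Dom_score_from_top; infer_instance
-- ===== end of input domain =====

-- B replaces A's reversed scan with an early-return counter by a forward scan remembering the
-- last blocking index, computing the distance by subtraction (alternative decomposition, same cost).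

-- ===== PORT A =====
-- the for-loop of A: counts each tree, returning early (score+1) at the first blocking one
def loopA (t : Int) : List Int → Int → Int
  | [], score => score
  | v :: rest, score =>
      if v < t then loopA t rest (score + 1)
      else if v ≥ t then score + 1
      else loopA t rest score

def score_from_top (matrix : List (List Int)) (row : Int) (col : Int) : Int :=
  let target_val := PySem.List.pyGetD (PySem.List.pyGetD matrix row []) col 0
  let col_vals := (PySem.List.pyRange 0 matrix.length 1).map
      (fun i => PySem.List.pyGetD (PySem.List.pyGetD matrix i []) col 0)
  let top_vals := (PySem.List.slice col_vals none (some row)).reverse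
  loopA target_val top_vals 0

-- ===== PORT B =====
-- B's forward loop: the index of the last blocking tree among the rows above, if any
def lastBlock (t : Int) (top : List Int) : Option Int :=
  (PySem.List.enumerate top 0).foldl (fun b p => if p.2 ≥ t then some p.1 else b) none

def score_from_top_alt (matrix : List (List Int)) (row : Int) (col : Int) : Int :=
  let target_val := PySem.List.pyGetD (PySem.List.pyGetD matrix row []) col 0
  let col_vals := (PySem.List.pyRange 0 matrix.length 1).map
      (fun i => PySem.List.pyGetD (PySem.List.pyGetD matrix i []) col 0)
  let top := PySem.List.slice col_vals none (some row)
  match lastBlock target_val top with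
  | none => (top.length : Int)
  | some block => (top.length : Int) - block

-- ===== PRECONDITION & SPEC =====
-- exactly where Python A returns: row must index matrix, and col must index every row
def Pre_score_from_top (matrix : List (List Int)) (row : Int) (col : Int) : Prop :=
  PySem.Raise.InRange matrix.length row ∧ ∀ r ∈ matrix, PySem.Raise.InRange r.length col
instance (matrix : List (List Int)) (row : Int) (col : Int) : Decidable (Pre_score_from_top matrix row col) := by unfold Pre_score_from_top; infer_instance

def pvWitness_score_from_top : List (List Int) × Int × Int := ([[3, 0], [2, 5], [4, 1]], 2, 0)

def Spec_score_from_top (matrix : List (List Int)) (row : Int) (col : Int) (out : Int) : Prop := out = score_from_top_alt matrix row col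
instance (matrix : List (List Int)) (row : Int) (col : Int) (out : Int) : Decidable (Spec_score_from_top matrix row col out) := by unfold Spec_score_from_top; infer_instance

-- ===== CLAIM (what is proved, stated in full; the proofs are below) =====
def Claim_equal_score_from_top : Prop := ∀ (matrix : List (List Int)) (row : Int) (col : Int), Dom_score_from_top matrix row col → Pre_score_from_top matrix row col → Spec_score_from_top matrix row col (score_from_top matrix row col)

-- ===== LEMMAS AND PROOFS =====

theorem loopA_shift (t : Int) (l : List Int) (s : Int) :
    loopA t l s = s + loopA t l 0 := by
  induction l generalizing s with
  | nil => simp [loopA]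
  | cons v rest ih =>
      by_cases h : v < t
      · simp only [loopA, if_pos h]
        rw [ih (s + 1), ih (0 + 1)]; ring
      · have h' : v ≥ t := le_of_not_gt h
        simp [loopA, h, h']

theorem enumerate_append_singleton (xs : List Int) (v : Int) (s : Int) :
    PySem.List.enumerate (xs ++ [v]) s = PySem.List.enumerate xs s ++ [(s + (xs.length : Int), v)] := by
  induction xs generalizing s with
  | nil => simp [PySem.List.enumerate_nil, PySem.List.enumerate_cons]
  | cons x xs ih =>
      rw [List.cons_append, PySem.List.enumerate_cons, PySem.List.enumerate_cons, ih]
      have h1 : s + 1 + (xs.length : Int) = s + ((xs.length : Int) + 1) := by ring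
      rw [h1, List.length_cons]
      push_cast
      rfl

theorem lastBlock_append (t : Int) (l : List Int) (v : Int) :
    lastBlock t (l ++ [v]) = if v ≥ t then some (l.length : Int) else lastBlock t l := by
  unfold lastBlock
  rw [enumerate_append_singleton, List.foldl_append]
  simp

theorem loopA_reverse_eq (t : Int) (l : List Int) :
    loopA t l.reverse 0 =
      (match lastBlock t l with
       | none => (l.length : Int)
       | some block => (l.length : Int) - block) := by
  induction l using List.reverseRecOn with
  | nil => simp [loopA, lastBlock, PySem.List.enumerate_nil]
  | append_singleton l v ih =>
      rw [lastBlock_append]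
      by_cases h : v ≥ t
      · have h' : ¬ v < t := not_lt_of_ge h
        simp [loopA, h, h']
      · have h' : v < t := lt_of_not_ge h
        simp only [if_neg h, List.reverse_append, List.reverse_singleton,
          List.singleton_append, loopA, if_pos h']
        rw [loopA_shift, ih]
        cases hb : lastBlock t l with
        | none =>
            simp only [List.length_append, List.length_cons, List.length_nil]
            push_cast
            ring
        | some b =>
            simp only [List.length_append, List.length_cons, List.length_nil]
            push_cast
            ring

-- ===== VERDICT (by name: the statement is the Claim_ definition above) =====
theorem score_from_top_spec : Claim_equal_score_from_top := by
  intro matrix row col _ _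
  unfold Spec_score_from_top score_from_top score_from_top_alt
  exact loopA_reverse_eq _ _
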